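-- pv_equiv track=rewrite | github.com/garv1189/AGR-ANALYTICS | backend/agent_chief.py | _is_related
-- ===== SOURCE A (Python) =====
-- def _is_related(metric_name: str, text_snippet: str) -> bool:
--     """Check if a metric name is related to a text snippet"""
--     metric_keywords = metric_name.lower().replace('_', ' ').split()
--     text_lower = text_snippet.lower()
--
--     # Check for direct matches or related terms
--     related_terms = {
--         'revenue': ['sales', 'income', 'revenue'],
--         'debt': ['debt', 'liability', 'leverage', 'borrowing'],
--         'profit': ['profit', 'earnings', 'income', 'margin'],
--         'asset': ['asset', 'property', 'investment'],
--         'equity': ['equity', 'shareholder', 'stockholder']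
--     }
--
--     for keyword in metric_keywords:
--         if keyword in text_lower:
--             return True
--
--         for key, terms in related_terms.items():
--             if keyword in terms and any(term in text_lower for term in terms):
--                 return True
--
--     return False
-- ===== SOURCE B (Python) =====
-- def _is_related(metric_name: str, text_snippet: str) -> bool:
--     """Check if a metric name is related to a text snippet"""
--     metric_keywords = metric_name.lower().replace('_', ' ').split()
--     text_lower = text_snippet.lower()
--
--     related_terms = {
--         'revenue': ['sales', 'income', 'revenue'],
--         'debt': ['debt', 'liability', 'leverage', 'borrowing'],
--         'profit': ['profit', 'earnings', 'income', 'margin'],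
--         'asset': ['asset', 'property', 'investment'],
--         'equity': ['equity', 'shareholder', 'stockholder']
--     }
--
--     # Pass 1: union of all terms of every group that is present in the text.
--     active = set()
--     for terms in related_terms.values():
--         if any(term in text_lower for term in terms):
--             active.update(terms)
--
--     # Pass 2: one flat scan over the keywords.
--     for keyword in metric_keywords:
--         if keyword in text_lower or keyword in active:
--             return True
--     return False
-- ===== Notes on version B (the rewrite author's own statement) =====
-- stated objective: simpler
-- what changed: Precomputes once the set of terms belonging to text-present groups, turning the nested per-keyword scan over all groups into two flat passes (build active set, then one membership test per keyword).
import Mathlib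
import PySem

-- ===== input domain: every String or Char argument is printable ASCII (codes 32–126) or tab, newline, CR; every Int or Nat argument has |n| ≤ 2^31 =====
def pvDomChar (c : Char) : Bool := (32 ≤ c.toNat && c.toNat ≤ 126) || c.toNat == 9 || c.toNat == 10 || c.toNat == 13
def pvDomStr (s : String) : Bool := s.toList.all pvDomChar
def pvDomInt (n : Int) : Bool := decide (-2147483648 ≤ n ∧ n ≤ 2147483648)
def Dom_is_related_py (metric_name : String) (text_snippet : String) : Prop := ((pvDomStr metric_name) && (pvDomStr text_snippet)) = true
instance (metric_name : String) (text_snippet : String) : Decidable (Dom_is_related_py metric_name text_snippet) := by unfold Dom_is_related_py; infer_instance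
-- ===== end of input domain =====

-- B builds the set of terms of text-present groups once, then scans the keywords in one flat pass
-- (objective: simpler two-pass decomposition; same return value as A everywhere).

-- ===== PORT A =====
-- the literal related_terms dict, as an association list in insertion order (shared table)
def relatedTerms : List (String × List String) :=
  [("revenue", ["sales", "income", "revenue"]),
   ("debt", ["debt", "liability", "leverage", "borrowing"]),
   ("profit", ["profit", "earnings", "income", "margin"]),
   ("asset", ["asset", "property", "investment"]),
   ("equity", ["equity", "shareholder", "stockholder"])]

-- inner 'for key, terms in related_terms.items(): if keyword in terms and any(...): return True'
def aInner (keyword : String) (text_lower : String) : List (String × List String) → Bool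
  | [] => false
  | (_, terms) :: rest =>
    if terms.contains keyword && terms.any (fun term => PySem.Str.isIn term text_lower) then
      true
    else aInner keyword text_lower rest

-- outer 'for keyword in metric_keywords: …'
def aOuter (text_lower : String) : List String → Bool
  | [] => false
  | keyword :: rest =>
    if PySem.Str.isIn keyword text_lower then true
    else if aInner keyword text_lower relatedTerms then true
    else aOuter text_lower rest

def is_related_py (metric_name : String) (text_snippet : String) : Bool :=
  aOuter (PySem.Str.lower text_snippet)
    (PySem.Str.split₀ (PySem.Str.replace (PySem.Str.lower metric_name) "_" " "))

-- ===== PORT B =====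
-- pass 1: 'active = set(); for terms in related_terms.values(): if any(...): active.update(terms)'
def bActive (text_lower : String) : PySem.Set String :=
  relatedTerms.foldl
    (fun active p =>
      if p.2.any (fun term => PySem.Str.isIn term text_lower) then PySem.Set.update active p.2
      else active)
    PySem.Set.empty

-- pass 2: 'for keyword in metric_keywords: if keyword in text_lower or keyword in active: return True'
def bScan (text_lower : String) (active : PySem.Set String) : List String → Bool
  | [] => false
  | keyword :: rest =>
    if PySem.Str.isIn keyword text_lower || PySem.Set.contains active keyword then true
    else bScan text_lower active rest

def is_related_py_alt (metric_name : String) (text_snippet : String) : Bool :=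
  let text_lower := PySem.Str.lower text_snippet
  bScan text_lower (bActive text_lower)
    (PySem.Str.split₀ (PySem.Str.replace (PySem.Str.lower metric_name) "_" " "))

-- ===== PRECONDITION & SPEC =====
def Spec_is_related_py (metric_name : String) (text_snippet : String) (out : Bool) : Prop := out = is_related_py_alt metric_name text_snippet
instance (metric_name : String) (text_snippet : String) (out : Bool) : Decidable (Spec_is_related_py metric_name text_snippet out) := by unfold Spec_is_related_py; infer_instance

-- ===== CLAIM (what is proved, stated in full; the proofs are below) =====
def Claim_equal_is_related_py : Prop := ∀ (metric_name : String) (text_snippet : String), Dom_is_related_py metric_name text_snippet → Spec_is_related_py metric_name text_snippet (is_related_py metric_name text_snippet)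

-- ===== LEMMAS AND PROOFS =====

-- membership in the active set: k is in the fold iff it was in the seed or in some present group
lemma mem_foldl_active (text_lower : String) (k : String)
    (L : List (String × List String)) (s : PySem.Set String) :
    k ∈ L.foldl
      (fun active p =>
        if p.2.any (fun term => PySem.Str.isIn term text_lower) then PySem.Set.update active p.2
        else active) s
    ↔ k ∈ s ∨ ∃ p ∈ L, (p.2.any (fun term => PySem.Str.isIn term text_lower)) = true ∧ k ∈ p.2 := by
  induction L generalizing s with
  | nil => simp
  | cons hd tl ih =>
    simp only [List.foldl_cons, ih]
    split_ifs with hpres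
    · simp only [PySem.Set.mem_update, List.mem_cons]
      constructor
      · rintro ((h | h) | ⟨p, hp, h1, h2⟩)
        · exact Or.inl h
        · exact Or.inr ⟨hd, Or.inl rfl, hpres, h⟩
        · exact Or.inr ⟨p, Or.inr hp, h1, h2⟩
      · rintro (h | ⟨p, hp, h1, h2⟩)
        · exact Or.inl (Or.inl h)
        · rcases hp with rfl | hp
          · exact Or.inl (Or.inr h2)
          · exact Or.inr ⟨p, hp, h1, h2⟩
    · simp only [List.mem_cons]
      constructor
      · rintro (h | ⟨p, hp, h1, h2⟩)
        · exact Or.inl h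
        · exact Or.inr ⟨p, Or.inr hp, h1, h2⟩
      · rintro (h | ⟨p, hp, h1, h2⟩)
        · exact Or.inl h
        · rcases hp with rfl | hp
          · exact absurd h1 hpres
          · exact Or.inr ⟨p, hp, h1, h2⟩

-- the inner A-loop is an existential over the table
lemma aInner_eq_true (keyword text_lower : String) (L : List (String × List String)) :
    aInner keyword text_lower L = true
    ↔ ∃ p ∈ L, keyword ∈ p.2 ∧ (p.2.any (fun term => PySem.Str.isIn term text_lower)) = true := by
  induction L with
  | nil => simp [aInner]
  | cons hd tl ih =>
    obtain ⟨key, terms⟩ := hd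
    simp only [aInner, List.mem_cons]
    split_ifs with h
    · simp only [Bool.and_eq_true, List.contains_eq_mem, decide_eq_true_eq] at h
      exact ⟨fun _ => ⟨(key, terms), Or.inl rfl, h.1, h.2⟩, fun _ => rfl⟩
    · rw [ih]
      constructor
      · rintro ⟨p, hp, h1, h2⟩; exact ⟨p, Or.inr hp, h1, h2⟩
      · rintro ⟨p, hp, h1, h2⟩
        rcases hp with rfl | hp
        · exact absurd (show (terms.contains keyword && (key, terms).2.any (fun term => PySem.Str.isIn term text_lower)) = true from
            by simp only [Bool.and_eq_true, List.contains_eq_mem, decide_eq_true_eq]; exact ⟨h1, h2⟩) h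
        · exact ⟨p, hp, h1, h2⟩

-- per-keyword conditions of the two programs coincide
lemma cond_eq (keyword text_lower : String) :
    aInner keyword text_lower relatedTerms = PySem.Set.contains (bActive text_lower) keyword := by
  rw [Bool.eq_iff_iff]
  rw [show (PySem.Set.contains (bActive text_lower) keyword = true) ↔ keyword ∈ bActive text_lower from PySem.Set.contains_iff _ _]
  rw [aInner_eq_true, bActive, mem_foldl_active]
  constructor
  · rintro ⟨p, hp, h1, h2⟩; exact Or.inr ⟨p, hp, h2, h1⟩
  · rintro (hs | ⟨p, hp, h1, h2⟩)
    · exact absurd hs (by simp [PySem.Set.empty])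
    · exact ⟨p, hp, h2, h1⟩

-- the two scans agree keyword by keyword
lemma scan_eq (text_lower : String) (l : List String) :
    aOuter text_lower l = bScan text_lower (bActive text_lower) l := by
  induction l with
  | nil => rfl
  | cons keyword rest ih =>
    simp only [aOuter, bScan]
    rw [← cond_eq keyword text_lower, ih]
    cases PySem.Str.isIn keyword text_lower <;>
      cases aInner keyword text_lower relatedTerms <;> simp

-- ===== VERDICT (by name: the statement is the Claim_ definition above) =====
theorem is_related_py_spec : Claim_equal_is_related_py := by
  intro metric_name text_snippet _
  unfold Spec_is_related_py is_related_py is_related_py_alt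
  exact scan_eq _ _
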